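-- pv_equiv track=rewrite | github.com/Vishwesh4/Real-time-prediction | Real_time.py | time_bucket
-- ===== SOURCE A (Python) =====
-- def time_bucket(x):
--   #Bucketizing the time into 8 buckets
--   if x is None:
--     return 3
--   if x[-1]!='P' and x[-1]!='A':
--     return 3
--   try:
--     time = int(x[:-1])
--   except:
--     return 3
--   if x[-1]=='P':
--     time = 1200+time
--   for i in range(8):
--     if time>=300*i and time<300*(i+1):
--       return i
-- ===== SOURCE B (Python) =====
-- def time_bucket(x):
--   # Dict-driven offsets and closed-form bucket (time // 300) instead of the 8-interval scan.
--   if x is None: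
--     return 3
--   suffix, body = x[-1], x[:-1]
--   offsets = {'A': 0, 'P': 1200}
--   if suffix not in offsets:
--     return 3
--   try:
--     minutes = offsets[suffix] + int(body)
--   except ValueError:
--     return 3
--   b = minutes // 300
--   return b if b in range(8) else None
-- ===== Notes on version B (the rewrite author's own statement) =====
-- stated objective: simpler
-- what changed: Replaces A's equality-guard chain and 8-iteration interval scan with a {'A':0,'P':1200} offset table lookup and the closed-form bucket index minutes // 300, returned only when it lies in range(8) (else None, like the loop's fall-through).
-- outside the precondition, e.g. on time_bucket(''): A raises IndexError, B raises IndexError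
import Mathlib
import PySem

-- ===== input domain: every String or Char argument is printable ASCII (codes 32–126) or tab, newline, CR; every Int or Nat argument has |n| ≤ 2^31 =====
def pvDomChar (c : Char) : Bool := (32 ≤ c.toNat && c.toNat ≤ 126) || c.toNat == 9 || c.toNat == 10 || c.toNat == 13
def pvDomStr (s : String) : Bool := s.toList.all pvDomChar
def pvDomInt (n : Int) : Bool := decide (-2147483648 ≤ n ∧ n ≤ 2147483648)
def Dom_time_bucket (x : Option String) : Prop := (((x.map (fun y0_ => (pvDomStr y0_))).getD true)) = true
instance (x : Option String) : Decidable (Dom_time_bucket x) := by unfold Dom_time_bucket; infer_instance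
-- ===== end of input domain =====

-- B replaces A's guard chain + 8-interval scan with an {'A':0,'P':1200} offset table and the closed-form bucket minutes // 300 (simpler, same O(1) cost).


-- ===== PORT A =====
-- 'for i in range(8): if time>=300*i and time<300*(i+1): return i'  (falling off the loop = None)
def bucketScan (time : Int) : Option Int :=
  (PySem.List.pyRange 0 8 1).findSome? (fun i =>
    if time ≥ 300 * i ∧ time < 300 * (i + 1) then some i else none)

def time_bucket (x : Option String) : Option Int :=
  match x with
  | none => some 3                        -- if x is None: return 3
  | some s =>
    (PySem.Str.pyGet? s (-1)).bind fun last =>   -- x[-1]; none = IndexError on "" (excluded by Pre_)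
      if last ≠ 'P' ∧ last ≠ 'A' then some 3
      else
        -- try: time = int(x[:-1]) except: return 3
        (PySem.Int.ofStr? (PySem.Str.slice s none (some (-1)))).elim (some 3) fun t =>
          bucketScan (if last = 'P' then 1200 + t else t)

-- ===== PORT B =====
-- offsets = {'A': 0, 'P': 1200}; b = minutes // 300; return b if b in range(8) else None
def pvOffsets : PySem.Dict Char Int := PySem.Dict.mk [('A', 0), ('P', 1200)]

def time_bucket_alt (x : Option String) : Option Int :=
  match x with
  | none => some 3                        -- if x is None: return 3
  | some s =>
    match PySem.Str.pyGet? s (-1) with    -- suffix = x[-1]; none = IndexError on "" (excluded by Pre_)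
    | none => none
    | some suffix =>
      let body := PySem.Str.slice s none (some (-1))   -- body = x[:-1]
      match PySem.Dict.get? pvOffsets suffix with       -- 'if suffix not in offsets: return 3' + offsets[suffix]
      | none => some 3
      | some off =>
        match PySem.Int.ofStr? body with                -- int(body); ValueError → return 3
        | none => some 3
        | some n =>
          let b := PySem.Int.floordiv (off + n) 300
          if (PySem.List.pyRange 0 8 1).contains b then some b else none   -- b in range(8)

-- ===== PRECONDITION & SPEC =====
-- Pre_ excludes only x = some "" : there A's x[-1] raises IndexError (B raises there too).
def Pre_time_bucket (x : Option String) : Prop := x ≠ some ""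
instance (x : Option String) : Decidable (Pre_time_bucket x) := by unfold Pre_time_bucket; infer_instance
def pvWitness_time_bucket : Option String := some "130A"

def Spec_time_bucket (x : Option String) (out : Option Int) : Prop := out = time_bucket_alt x
instance (x : Option String) (out : Option Int) : Decidable (Spec_time_bucket x out) := by unfold Spec_time_bucket; infer_instance

-- ===== CLAIM (what is proved, stated in full; the proofs are below) =====
def Claim_equal_time_bucket : Prop := ∀ (x : Option String), Dom_time_bucket x → Pre_time_bucket x → Spec_time_bucket x (time_bucket x)

-- ===== LEMMAS AND PROOFS =====
-- The scan over range(8) equals the closed-form 'b = t // 300, in range(8)' test, for every time value.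
set_option maxHeartbeats 2000000 in
theorem scan_eq_closed (t : Int) :
    bucketScan t =
      (if (PySem.List.pyRange 0 8 1).contains (PySem.Int.floordiv t 300) then
        some (PySem.Int.floordiv t 300) else none) := by
  have hr : PySem.List.pyRange 0 8 1 = [0, 1, 2, 3, 4, 5, 6, 7] := by
    rw [PySem.List.pyRange_one]; simp [List.range_succ]
  unfold bucketScan
  rw [hr, PySem.Int.floordiv_eq_ediv_of_pos (by norm_num : (0:Int) < 300)]
  simp only [List.findSome?_cons, List.findSome?_nil, List.contains_eq_mem, List.mem_cons,
    List.not_mem_nil, or_false, decide_eq_true_eq]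
  split_ifs <;> first | rfl | (simp only [Option.some.injEq]; omega) | (exfalso; omega)

-- The common tail of both ports, generalized over the stuck subterms x[-1] and int(x[:-1]).
theorem tails_eq (g : Option Char) (o : Option Int) :
    (g.bind fun last =>
      if last ≠ 'P' ∧ last ≠ 'A' then some 3
      else o.elim (some 3) fun t => bucketScan (if last = 'P' then 1200 + t else t))
    = (match g with
      | none => none
      | some suffix =>
        match PySem.Dict.get? pvOffsets suffix with
        | none => some 3
        | some off =>
          match o with
          | none => some 3
          | some n =>
            let b := PySem.Int.floordiv (off + n) 300
            if (PySem.List.pyRange 0 8 1).contains b then some b else none) := by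
  cases g with
  | none => rfl
  | some last =>
    simp only [Option.bind_some]
    by_cases hp : last = 'P'
    · subst hp
      rw [if_neg (by simp)]
      have : PySem.Dict.get? pvOffsets 'P' = some 1200 := by decide
      rw [this]
      cases o with
      | none => rfl
      | some t =>
        simp only [Option.elim_some]
        rw [scan_eq_closed]
        norm_num [Int.add_comm]
    · by_cases ha : last = 'A'
      · subst ha
        rw [if_neg (by simp)]
        have : PySem.Dict.get? pvOffsets 'A' = some 0 := by decide
        rw [this]
        cases o with
        | none => rfl
        | some t =>
          simp only [Option.elim_some]
          rw [if_neg (by decide), scan_eq_closed]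
          norm_num
      · rw [if_pos ⟨hp, ha⟩]
        have : PySem.Dict.get? pvOffsets last = none := by
          simp [pvOffsets, PySem.Dict.get?,
            (by simpa using Ne.symm ha : ('A' == last) = false),
            (by simpa using Ne.symm hp : ('P' == last) = false)]
        rw [this]

-- ===== VERDICT (by name: the statement is the Claim_ definition above) =====
theorem time_bucket_spec : Claim_equal_time_bucket := by
  intro x _ _
  unfold Spec_time_bucket time_bucket time_bucket_alt
  cases x with
  | none => rfl
  | some s =>
    exact tails_eq (PySem.Str.pyGet? s (-1))
      (PySem.Int.ofStr? (PySem.Str.slice s none (some (-1))))
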